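-- pv_equiv track=rewrite | github.com/RubberDuckCollector/quizlet-write | test2.py | hard
-- ===== SOURCE A (Python) =====
-- chars_to_ignore = ['.', '\'', '\"', ' ', '_', '+', '+', '[', ']', '<', '>']
--
-- def hard(msg: str) -> str:
--     # turn the string into a list of chars
--     msg = list(msg)
--
--     hint = ""
--     inside_brackets = False
--
--     for i in range(1, len(msg)):
--         if msg[i] in chars_to_ignore:
--             # if the current char is supposed to be left untouched
--             # do that and add it straight to the hint
--             hint += msg[i]
--         else:
--             if msg[i] == '(':
--                 # add the ( to the hint
--                 # change the program flow to signal that the code is within a pair of brackets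
--                 inside_brackets = True
--                 hint += '('
--             elif msg[i] == ')':
--                 # signal that the program is outside the brackets
--                 # can now add '_' to the rest of the hint
--                 inside_brackets = False
--                 hint += ')'
--             elif inside_brackets is True:
--                 # add the actual char to the hint if the char is in betwwen brackets
--                 hint += msg[i]
--             else:
--                 hint += '_'
--
--     return hint
-- ===== SOURCE B (Python) =====
-- chars_to_ignore = ['.', '\'', '\"', ' ', '_', '+', '+', '[', ']', '<', '>']
--
-- def hard(msg: str) -> str:
--     # pass 1: boolean mask of the inside-brackets state at each position of msg[1:]
--     tail = msg[1:]
--     inside = []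
--     state = False
--     for ch in tail:
--         if ch == '(':
--             state = True
--         inside.append(state)
--         if ch == ')':
--             state = False
--     # pass 2: render
--     return ''.join(
--         ch if (ch in chars_to_ignore or ch in '()' or keep) else '_'
--         for ch, keep in zip(tail, inside)
--     )
-- ===== Notes on version B (the rewrite author's own statement) =====
-- stated objective: alternative
-- what changed: Replaces A's single stateful loop with nested branches by two separate passes: one scan building a boolean inside-brackets mask, then a flat join rendering each character from the mask.
import Mathlib
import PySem

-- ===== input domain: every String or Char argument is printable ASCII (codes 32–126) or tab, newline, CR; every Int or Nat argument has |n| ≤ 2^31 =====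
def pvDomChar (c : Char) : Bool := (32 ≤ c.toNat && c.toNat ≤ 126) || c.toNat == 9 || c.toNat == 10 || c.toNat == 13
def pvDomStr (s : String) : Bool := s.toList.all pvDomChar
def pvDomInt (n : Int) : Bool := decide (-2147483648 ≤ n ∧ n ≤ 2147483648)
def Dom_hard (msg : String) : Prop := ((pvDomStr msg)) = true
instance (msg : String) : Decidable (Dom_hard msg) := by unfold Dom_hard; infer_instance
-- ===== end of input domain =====

-- B is a two-pass decomposition of A's single stateful loop (same cost); return value only, total.

-- ===== PORT A =====
def charsToIgnore : List Char := ['.', '\'', '\"', ' ', '_', '+', '+', '[', ']', '<', '>']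

-- A: one loop over msg[1:] carrying (hint, inside_brackets), branches in A's order
def hardStep (st : List Char × Bool) (c : Char) : List Char × Bool :=
  if charsToIgnore.contains c then (st.1 ++ [c], st.2)
  else if c = '(' then (st.1 ++ ['('], true)
  else if c = ')' then (st.1 ++ [')'], false)
  else if st.2 then (st.1 ++ [c], st.2)
  else (st.1 ++ ['_'], st.2)

def hard (msg : String) : String :=
  String.ofList ((msg.toList.drop 1).foldl hardStep ([], false)).1

-- ===== PORT B =====
-- pass 1: the inside-brackets state at each position
def hardInside : List Char → Bool → List Bool
  | [], _ => []
  | c :: cs, st =>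
      let st' := if c = '(' then true else st
      st' :: hardInside cs (if c = ')' then false else st')

-- pass 2: render one character from its mask bit
def hardRender (c : Char) (keep : Bool) : Char :=
  if charsToIgnore.contains c || c = '(' || c = ')' || keep then c else '_'

def hard_alt (msg : String) : String :=
  let tail := msg.toList.drop 1
  String.ofList ((tail.zip (hardInside tail false)).map (fun p => hardRender p.1 p.2))

-- ===== PRECONDITION & SPEC =====
def Spec_hard (msg : String) (out : String) : Prop := out = hard_alt msg
instance (msg : String) (out : String) : Decidable (Spec_hard msg out) := by unfold Spec_hard; infer_instance

-- ===== CLAIM (what is proved, stated in full; the proofs are below) =====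
def Claim_equal_hard : Prop := ∀ (msg : String), Dom_hard msg → Spec_hard msg (hard msg)

-- ===== LEMMAS AND PROOFS =====
lemma hard_loop_eq (cs : List Char) : ∀ (acc : List Char) (st : Bool),
    (cs.foldl hardStep (acc, st)).1
    = acc ++ (cs.zip (hardInside cs st)).map (fun p => hardRender p.1 p.2) := by
  induction cs with
  | nil => simp
  | cons c cs ih =>
      intro acc st
      rw [List.foldl_cons]
      by_cases hi : c ∈ charsToIgnore
      · have hop : c ≠ '(' := by rintro rfl; revert hi; decide
        have hcl : c ≠ ')' := by rintro rfl; revert hi; decide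
        have hstep : hardStep (acc, st) c = (acc ++ [c], st) := by
          simp [hardStep, hi]
        rw [hstep, ih]
        simp [hardInside, hardRender, hi, hop, hcl]
      · by_cases hop : c = '('
        · subst hop
          have hstep : hardStep (acc, st) '(' = (acc ++ ['('], true) := by
            simp [hardStep, hi]
          rw [hstep, ih]
          simp [hardInside, hardRender, hi]
        · by_cases hcl : c = ')'
          · subst hcl
            have hstep : hardStep (acc, st) ')' = (acc ++ [')'], false) := by
              simp [hardStep, hi, hop]
            rw [hstep, ih]
            simp [hardInside, hardRender, hi, hop]
          · have hstep : hardStep (acc, st) c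
                = (acc ++ [if st then c else '_'], st) := by
              cases st <;> simp [hardStep, hi, hop, hcl]
            rw [hstep, ih]
            cases st <;> simp [hardInside, hardRender, hi, hop, hcl]

-- ===== VERDICT (by name: the statement is the Claim_ definition above) =====
theorem hard_spec : Claim_equal_hard := by
  intro msg _
  unfold Spec_hard hard hard_alt
  rw [hard_loop_eq]
  simp
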